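-- pv_equiv track=rewrite | github.com/weil0819/Vox3DMod | src/postgres.py | get_material_path
-- ===== SOURCE A (Python) =====
-- def get_material_path(depth, x, y, z):
-- 	'''
-- 	:function:
-- 		- Calculate material path of a leaf node in an octree
-- 	:param depth:
-- 		- Octree depth
-- 	:param x,y,z:
-- 		- The x,y,z coordinates
-- 	'''
-- 	ocKey = ''
-- 	for i in range(depth, 0, -1):
-- 		digit = 0
-- 		mask = 1 << (i-1)
-- 		if (x & mask) != 0:
-- 			digit += 1
-- 		if (y & mask) != 0:
-- 			digit += 2
-- 		if (z & mask) != 0: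
-- 			digit += 4
-- 		ocKey +=str(digit)
-- 	return ocKey
-- ===== SOURCE B (Python) =====
-- def get_material_path(depth, x, y, z):
--     digits = []
--     for _ in range(max(depth, 0)):
--         digits.append("01234567"[(x & 1) + 2 * (y & 1) + 4 * (z & 1)])
--         x >>= 1
--         y >>= 1
--         z >>= 1
--     digits.reverse()
--     return ''.join(digits)
-- ===== Notes on version B (the rewrite author's own statement) =====
-- stated objective: faster
-- what changed: B traverses the bits least-significant first, shifting the three coordinates right by one each step and collecting digit characters from a lookup table into a list that is reversed and joined once, instead of A's most-significant-first loop that builds a fresh depth-bit mask (1 << (i-1)) every iteration and concatenates str(digit) onto a growing string.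
import Mathlib
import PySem

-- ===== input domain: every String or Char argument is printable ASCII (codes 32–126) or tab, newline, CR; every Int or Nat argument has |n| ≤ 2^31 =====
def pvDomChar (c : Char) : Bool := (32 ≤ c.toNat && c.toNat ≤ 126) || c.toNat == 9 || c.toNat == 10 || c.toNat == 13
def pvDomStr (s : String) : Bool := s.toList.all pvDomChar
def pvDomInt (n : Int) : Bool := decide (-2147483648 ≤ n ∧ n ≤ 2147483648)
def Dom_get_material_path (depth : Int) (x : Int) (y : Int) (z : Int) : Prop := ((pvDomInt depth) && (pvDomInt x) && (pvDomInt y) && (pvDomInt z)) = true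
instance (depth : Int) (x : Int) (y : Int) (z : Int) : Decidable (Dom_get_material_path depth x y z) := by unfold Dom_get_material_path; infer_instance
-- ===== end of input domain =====

-- B walks the coordinates least-significant-bit first (shifting them right), collects the octal
-- digit characters in a list and reverses it once, instead of A's per-position big mask build
-- (1 << (i-1)) and repeated string concatenation.

-- ===== PORT A =====
def get_material_path (depth : Int) (x : Int) (y : Int) (z : Int) : String :=
  (PySem.List.pyRange depth 0 (-1)).foldl (fun ocKey i =>
    let digit : Int := 0
    -- mask = 1 << (i-1); every i in the range satisfies i ≥ 1, so the shift amount is ≥ 0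
    let mask : Int := (1:Int) <<< ((i - 1).toNat : Int)
    let digit := if PySem.Int.band x mask ≠ 0 then digit + 1 else digit
    let digit := if PySem.Int.band y mask ≠ 0 then digit + 2 else digit
    let digit := if PySem.Int.band z mask ≠ 0 then digit + 4 else digit
    ocKey ++ PySem.Int.toStr digit) ""

-- ===== PORT B =====
-- "01234567"[(x & 1) + 2*(y & 1) + 4*(z & 1)]: the index is always 0..7, so getD is exact
def pvDigitChar (x y z : Int) : Char :=
  "01234567".toList.getD (PySem.Int.band x 1 + 2 * PySem.Int.band y 1 + 4 * PySem.Int.band z 1).toNat ' '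

-- the loop body: append the digit char for the current low bits, then shift all three right
def pvLoop : Nat → Int → Int → Int → List Char
  | 0, _, _, _ => []
  | k + 1, x, y, z => pvDigitChar x y z :: pvLoop k (x >>> 1) (y >>> 1) (z >>> 1)

def get_material_path_alt (depth : Int) (x : Int) (y : Int) (z : Int) : String :=
  String.ofList ((pvLoop (max depth 0).toNat x y z).reverse)

-- ===== PRECONDITION & SPEC =====
def Spec_get_material_path (depth : Int) (x : Int) (y : Int) (z : Int) (out : String) : Prop := out = get_material_path_alt depth x y z
instance (depth : Int) (x : Int) (y : Int) (z : Int) (out : String) : Decidable (Spec_get_material_path depth x y z out) := by unfold Spec_get_material_path; infer_instance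

-- ===== CLAIM (what is proved, stated in full; the proofs are below) =====
def Claim_equal_get_material_path : Prop := ∀ (depth : Int) (x : Int) (y : Int) (z : Int), Dom_get_material_path depth x y z → Spec_get_material_path depth x y z (get_material_path depth x y z)

-- ===== LEMMAS AND PROOFS =====

def pvDigit (x y z mask : Int) : Int :=
  (if PySem.Int.band x mask ≠ 0 then (1:Int) else 0)
  + 2 * (if PySem.Int.band y mask ≠ 0 then (1:Int) else 0)
  + 4 * (if PySem.Int.band z mask ≠ 0 then (1:Int) else 0)

def pvD (x y z i : Int) : Int := pvDigit x y z ((1:Int) <<< (((i - 1).toNat : Nat) : Int))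

theorem pvDigit_bounds (x y z mask : Int) : 0 ≤ pvDigit x y z mask ∧ pvDigit x y z mask < 8 := by
  unfold pvDigit; split_ifs <;> omega

theorem pvToChars_digit (k : Int) (h0 : 0 ≤ k) (h8 : k < 8) :
    PySem.Int.toChars k = [Char.ofNat (48 + k.toNat)] := by
  interval_cases k <;> decide

theorem pvStr_key (d : Int → Int) :
    ∀ (L : List Int) (s : String),
      (L.foldl (fun s i => s ++ PySem.Int.toStr (d i)) s).toList
        = s.toList ++ L.flatMap (fun i => PySem.Int.toChars (d i)) := by
  intro L
  induction L with
  | nil => simp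
  | cons i L ih =>
      intro s
      simp only [List.foldl_cons, List.flatMap_cons, ih, String.toList_append,
        PySem.Int.toList_toStr, List.append_assoc]

theorem pvRange_down_eq (depth : Int) :
    PySem.List.pyRange depth 0 (-1) = (List.range depth.toNat).map (fun (j : Nat) => depth - (j : Int)) := by
  unfold PySem.List.pyRange
  rw [if_neg (by norm_num : ¬ (-1:Int) = 0), if_neg (by norm_num : ¬ (0:Int) < -1)]
  by_cases h : (0:Int) < depth
  · rw [if_pos h]
    norm_num
    intro a _
    omega
  · rw [if_neg h]
    have h0 : depth.toNat = 0 := by omega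
    rw [h0]
    rfl

theorem pvShl_cast (k : Nat) : ((1:Int) <<< (k:Int)) = Int.ofNat (1 <<< k) := by
  show (↑(Nat.shiftLeft' false 1 k) : Int) = _
  rw [Nat.shiftLeft'_false]; rfl

theorem pvBandBit (w : Int) (k : Nat) :
    PySem.Int.band (w >>> k) 1 = if PySem.Int.band w ((1:Int) <<< (k : Int)) ≠ 0 then 1 else 0 := by
  rw [pvShl_cast]
  have h2 : (1:Nat) <<< k = 2^k := by simp [Nat.shiftLeft_eq]
  have hp : (0:Nat) < 2^k := Nat.two_pow_pos k
  have ht : ∀ a : Nat, (a.testBit k).toNat = (a >>> k) % 2 := by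
    intro a
    have h1 : a.testBit k = ((a >>> k) % 2 == 1) := by simp [Nat.testBit]
    rw [h1]
    by_cases h : (a >>> k) % 2 = 1
    · simp [h]
    · have h0 : (a >>> k) % 2 = 0 := by omega
      simp [h, h0]
  cases w with
  | ofNat a =>
      show PySem.Int.band (↑(a >>> k) : Int) 1
          = if PySem.Int.band (↑a : Int) (↑((1:Nat) <<< k) : Int) ≠ 0 then 1 else 0
      rw [show ((1:Int)) = ((1:Nat) : Int) from rfl,
          PySem.Int.band_of_nonneg (Int.natCast_nonneg _) (Int.natCast_nonneg _),
          PySem.Int.band_of_nonneg (Int.natCast_nonneg _) (Int.natCast_nonneg _)]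
      simp only [Int.toNat_natCast, h2]
      rw [Nat.and_one_is_mod, Nat.and_two_pow, ht]
      have hm : (a >>> k) % 2 = 0 ∨ (a >>> k) % 2 = 1 := by omega
      rcases hm with h | h <;> simp [h, hp.ne']
  | negSucc a =>
      show PySem.Int.band (Int.negSucc (a >>> k)) 1
          = if PySem.Int.band (Int.negSucc a) (↑((1:Nat) <<< k) : Int) ≠ 0 then 1 else 0
      unfold PySem.Int.band
      have hn1 : ¬ (0:Int) ≤ Int.negSucc (a >>> k) := by
        have := Int.negSucc_lt_zero (a >>> k); omega
      have hn2 : ¬ (0:Int) ≤ Int.negSucc a := by have := Int.negSucc_lt_zero a; omega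
      rw [if_neg hn1, if_neg hn2, if_pos (by norm_num : (0:Int) ≤ 1), if_pos (Int.natCast_nonneg _)]
      have e1 : (-(Int.negSucc (a >>> k)) - 1).toNat = a >>> k := by rw [Int.neg_negSucc]; omega
      have e2 : (-(Int.negSucc a) - 1).toNat = a := by rw [Int.neg_negSucc]; omega
      have e3 : ((1:Int)).toNat = 1 := rfl
      have e4 : ((↑((1:Nat) <<< k) : Int)).toNat = 2^k := by rw [h2]; exact Int.toNat_natCast _
      rw [e1, e2, e3, e4, Nat.and_comm 1, Nat.and_one_is_mod, Nat.and_comm (2^k),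
          Nat.and_two_pow, ht]
      have hm : (a >>> k) % 2 = 0 ∨ (a >>> k) % 2 = 1 := by omega
      rcases hm with h | h <;> simp [h, hp.ne']

theorem pvShiftRight_succ (w : Int) (k : Nat) : w >>> (k + 1) = (w >>> 1) >>> k := by
  have hn : ∀ a : Nat, a >>> (k + 1) = (a >>> 1) >>> k := by
    intro a; rw [← Nat.shiftRight_add, Nat.add_comm 1 k]
  cases w with
  | ofNat a => exact congrArg Int.ofNat (hn a)
  | negSucc a => exact congrArg Int.negSucc (hn a)

theorem pvShiftRight_zero (w : Int) : w >>> (0:Nat) = w := by cases w <;> rfl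

theorem pvLoop_eq_map (n : Nat) : ∀ x y z : Int,
    pvLoop n x y z = (List.range n).map (fun (k : Nat) => pvDigitChar (x >>> k) (y >>> k) (z >>> k)) := by
  induction n with
  | zero => intro x y z; rfl
  | succ n ih =>
      intro x y z
      rw [pvLoop, ih, List.range_succ_eq_map, List.map_cons, List.map_map]
      refine congrArg₂ List.cons ?_ (List.map_congr_left fun k _ => ?_)
      · rw [pvShiftRight_zero, pvShiftRight_zero, pvShiftRight_zero]
      · simp only [Function.comp_apply]
        rw [← pvShiftRight_succ, ← pvShiftRight_succ, ← pvShiftRight_succ]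

theorem pvDigitChar_eq (x y z : Int) (k : Nat) :
    pvDigitChar (x >>> k) (y >>> k) (z >>> k)
      = Char.ofNat (48 + (pvDigit x y z ((1:Int) <<< (k : Int))).toNat) := by
  unfold pvDigitChar pvDigit
  rw [pvBandBit x k, pvBandBit y k, pvBandBit z k]
  split_ifs <;> rfl

-- ===== VERDICT (by name: the statement is the Claim_ definition above) =====
theorem get_material_path_spec : Claim_equal_get_material_path := by
  intro depth x y z _
  unfold Spec_get_material_path get_material_path get_material_path_alt
  have hA := PySem.List.foldl_congr_mem (PySem.List.pyRange depth 0 (-1))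
    (fun (ocKey : String) (i : Int) =>
      let digit : Int := 0
      let mask : Int := (1:Int) <<< ((i - 1).toNat : Int)
      let digit := if PySem.Int.band x mask ≠ 0 then digit + 1 else digit
      let digit := if PySem.Int.band y mask ≠ 0 then digit + 2 else digit
      let digit := if PySem.Int.band z mask ≠ 0 then digit + 4 else digit
      ocKey ++ PySem.Int.toStr digit)
    (fun s i => s ++ PySem.Int.toStr (pvD x y z i)) ""
    (by intro acc i _; simp only [pvD, pvDigit]; split_ifs <;> norm_num)
  refine Eq.trans hA ?_
  apply String.ext
  rw [pvStr_key (pvD x y z) (PySem.List.pyRange depth 0 (-1)) "", String.toList_ofList]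
  have hd : ∀ i, 0 ≤ pvD x y z i ∧ pvD x y z i < 8 := fun i => pvDigit_bounds x y z _
  have hflat : (PySem.List.pyRange depth 0 (-1)).flatMap (fun i => PySem.Int.toChars (pvD x y z i))
      = (PySem.List.pyRange depth 0 (-1)).map (fun i => Char.ofNat (48 + (pvD x y z i).toNat)) := by
    induction (PySem.List.pyRange depth 0 (-1)) with
    | nil => rfl
    | cons j L ihL =>
        simp only [List.flatMap_cons, List.map_cons, ihL,
          pvToChars_digit (pvD x y z j) (hd j).1 (hd j).2]
        rfl
  rw [hflat, pvRange_down_eq depth, List.map_map]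
  have hmax : (max depth 0).toNat = depth.toNat := by omega
  rw [hmax, pvLoop_eq_map depth.toNat x y z]
  set n := depth.toNat with hn
  apply List.ext_getElem
  · simp [String.toList_ofList]
  · intro p hp1 hp2
    simp only [List.nil_append, String.toList_ofList, List.length_map, List.length_range] at hp1 hp2
    simp only [List.nil_append, String.toList_ofList, List.getElem_map, List.getElem_range,
      Function.comp_apply, List.getElem_reverse, List.length_map, List.length_range]
    have hk : (depth - (p : Int) - 1).toNat = n - 1 - p := by omega
    rw [pvDigitChar_eq x y z (n - 1 - p)]
    unfold pvD
    rw [hk]
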